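-- pv_equiv track=rewrite | github.com/TSLeslie/recall | src/recall/app/hotkeys.py | format_hotkey_display
-- ===== SOURCE A (Python) =====
-- from typing import Any, Callable, Dict, List, Optional
--
-- MODIFIER_DISPLAY = {
--     "cmd": "⌘",
--     "super": "⌘",
--     "ctrl": "⌃",
--     "alt": "⌥",
--     "option": "⌥",
--     "shift": "⇧",
-- }
--
-- def parse_hotkey(hotkey_str: str) -> Dict[str, Any]:
--     """Parse a hotkey string into components.
--
--     Args:
--         hotkey_str: Hotkey string like "<cmd>+<shift>+r"
--
--     Returns:
--         Dictionary with 'modifiers' list and 'key' string.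
--     """
--     parts = hotkey_str.lower().split("+")
--     modifiers = []
--     key = ""
--
--     for part in parts:
--         # Remove angle brackets
--         clean = part.strip("<>")
--
--         if clean in ("cmd", "super", "ctrl", "alt", "option", "shift"):
--             modifiers.append(clean)
--         else:
--             key = clean
--
--     return {
--         "modifiers": modifiers,
--         "key": key,
--     }
--
-- def format_hotkey_display(hotkey_str: str) -> str:
--     """Format a hotkey string for display.
--
--     Args:
--         hotkey_str: Hotkey string like "<cmd>+<shift>+r"
--
--     Returns:
--         Display string like "⌘⇧R"
--     """
--     parsed = parse_hotkey(hotkey_str)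
--     parts = []
--
--     for mod in parsed["modifiers"]:
--         symbol = MODIFIER_DISPLAY.get(mod, mod.capitalize())
--         parts.append(symbol)
--
--     if parsed["key"]:
--         parts.append(parsed["key"].upper())
--
--     return "".join(parts)
-- ===== SOURCE B (Python) =====
-- MODIFIER_DISPLAY = {
--     "cmd": "⌘",
--     "super": "⌘",
--     "ctrl": "⌃",
--     "alt": "⌥",
--     "option": "⌥",
--     "shift": "⇧",
-- }
--
-- def format_hotkey_display(hotkey_str: str) -> str:
--     """Single inline pass: no intermediate parse dict, no second loop."""
--     out = []
--     key = ""
--     for part in hotkey_str.lower().split("+"):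
--         clean = part.strip("<>")
--         symbol = MODIFIER_DISPLAY.get(clean)
--         if symbol is not None:
--             out.append(symbol)
--         else:
--             key = clean
--     if key:
--         out.append(key.upper())
--     return "".join(out)
-- ===== Notes on version B (the rewrite author's own statement) =====
-- stated objective: simpler
-- what changed: B fuses A's two-pass parse-then-format structure into one traversal: it splits on the plus separator once and, per part, either appends the modifier's display symbol immediately (via a single dict lookup that also replaces A's membership tuple) or records the key, dropping the intermediate parsed dict and the second loop entirely.
import Mathlib
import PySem

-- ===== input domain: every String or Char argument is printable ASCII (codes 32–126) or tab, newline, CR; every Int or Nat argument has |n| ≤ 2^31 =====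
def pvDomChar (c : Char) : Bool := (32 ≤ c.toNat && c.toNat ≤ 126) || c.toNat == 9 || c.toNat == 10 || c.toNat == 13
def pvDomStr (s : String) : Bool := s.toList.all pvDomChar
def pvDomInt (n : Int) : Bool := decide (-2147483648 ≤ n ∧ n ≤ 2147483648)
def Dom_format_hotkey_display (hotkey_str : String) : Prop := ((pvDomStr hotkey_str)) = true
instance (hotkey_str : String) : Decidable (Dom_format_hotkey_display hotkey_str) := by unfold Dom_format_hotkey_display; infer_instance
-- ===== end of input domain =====

-- B fuses A's parse-then-format two-pass structure into a single traversal (objective: simpler); return values proved equal.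


-- ===== PORT A =====
-- MODIFIER_DISPLAY (module-level dict literal)
def pvModDisplay : PySem.Dict String String :=
  PySem.Dict.mk [("cmd", "⌘"), ("super", "⌘"), ("ctrl", "⌃"),
                 ("alt", "⌥"), ("option", "⌥"), ("shift", "⇧")]

-- Python str.capitalize (exact on the printable-ASCII domain: first char uppercased, rest lowered)
def pyCapitalize (s : String) : String :=
  match s.toList with
  | [] => ""
  | c :: rest => String.ofList (PySem.Chars.upperChar c :: PySem.Chars.lower rest)

-- per-modifier display: MODIFIER_DISPLAY.get(mod, mod.capitalize())
def pvDisp (m : String) : String := (pvModDisplay.get? m).getD (pyCapitalize m)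

-- loop body of parse_hotkey's for-loop
def pvStepA (st : List String × String) (part : String) : List String × String :=
  let clean := PySem.Str.stripChars part "<>"
  if clean ∈ ["cmd", "super", "ctrl", "alt", "option", "shift"]
  then (st.1 ++ [clean], st.2)
  else (st.1, clean)

def parse_hotkey (hotkey_str : String) : List String × String :=
  let parts := (PySem.Str.split? (PySem.Str.lower hotkey_str) "+").getD []
  parts.foldl pvStepA ([], "")

def format_hotkey_display (hotkey_str : String) : String :=
  let parsed := parse_hotkey hotkey_str
  let parts := parsed.1.foldl
    (fun acc m => acc ++ [pvDisp m]) []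
  let parts := if parsed.2 ≠ "" then parts ++ [PySem.Str.upper parsed.2] else parts
  PySem.Str.join "" parts

-- ===== PORT B =====
-- loop body of B's single for-loop
def pvStepB (st : List String × String) (part : String) : List String × String :=
  let clean := PySem.Str.stripChars part "<>"
  match pvModDisplay.get? clean with
  | some symbol => (st.1 ++ [symbol], st.2)
  | none => (st.1, clean)

def format_hotkey_display_alt (hotkey_str : String) : String :=
  let st := ((PySem.Str.split? (PySem.Str.lower hotkey_str) "+").getD []).foldl pvStepB ([], "")
  let out := if st.2 ≠ "" then st.1 ++ [PySem.Str.upper st.2] else st.1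
  PySem.Str.join "" out

-- ===== PRECONDITION & SPEC =====
def Spec_format_hotkey_display (hotkey_str : String) (out : String) : Prop := out = format_hotkey_display_alt hotkey_str
instance (hotkey_str : String) (out : String) : Decidable (Spec_format_hotkey_display hotkey_str out) := by unfold Spec_format_hotkey_display; infer_instance

-- ===== CLAIM (what is proved, stated in full; the proofs are below) =====
def Claim_equal_format_hotkey_display : Prop := ∀ (hotkey_str : String), Dom_format_hotkey_display hotkey_str → Spec_format_hotkey_display hotkey_str (format_hotkey_display hotkey_str)

-- ===== LEMMAS AND PROOFS =====

lemma pvGet?_modDisplay (s : String) :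
    pvModDisplay.get? s =
      if s = "cmd" then some "⌘" else if s = "super" then some "⌘"
      else if s = "ctrl" then some "⌃" else if s = "alt" then some "⌥"
      else if s = "option" then some "⌥" else if s = "shift" then some "⇧" else none := by
  simp only [pvModDisplay, PySem.Dict.get?_mk_cons]
  split_ifs <;> first | rfl | (exfalso; simp_all)

lemma pvStepB_eq (mods : List String) (key part : String) :
    pvStepB (mods.map pvDisp, key) part =
      ((pvStepA (mods, key) part).1.map pvDisp, (pvStepA (mods, key) part).2) := by
  simp only [pvStepA, pvStepB, pvGet?_modDisplay]
  by_cases h : PySem.Str.stripChars part "<>" ∈ ["cmd", "super", "ctrl", "alt", "option", "shift"]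
  · simp only [List.mem_cons, List.not_mem_nil, or_false] at h
    rcases h with h | h | h | h | h | h <;>
      simp [h, pvDisp, pvGet?_modDisplay]
  · simp only [List.mem_cons, List.not_mem_nil, or_false, not_or] at h
    obtain ⟨h1, h2, h3, h4, h5, h6⟩ := h
    simp [h1, h2, h3, h4, h5, h6, List.mem_cons]

lemma pvLoop_eq (parts : List String) (mods : List String) (key : String) :
    parts.foldl pvStepB (mods.map pvDisp, key) =
      ((parts.foldl pvStepA (mods, key)).1.map pvDisp,
       (parts.foldl pvStepA (mods, key)).2) := by
  induction parts generalizing mods key with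
  | nil => rfl
  | cons p rest ih =>
    simp only [List.foldl_cons]
    rw [pvStepB_eq]
    exact ih _ _

-- ===== VERDICT (by name: the statement is the Claim_ definition above) =====
theorem format_hotkey_display_spec : Claim_equal_format_hotkey_display := by
  intro s _
  show format_hotkey_display s = format_hotkey_display_alt s
  unfold format_hotkey_display format_hotkey_display_alt parse_hotkey
  generalize (PySem.Str.split? (PySem.Str.lower s) "+").getD [] = parts
  have h := pvLoop_eq parts [] ""
  simp only [List.map_nil] at h
  simp only [h, PySem.List.foldl_append_singleton_eq_map, List.nil_append]
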